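-- pv_equiv track=rewrite | github.com/DanielNoumon/RLM_test_set_creation | v2_test_set_creation/parsing/pdf_parser.py | _build_page_offsets
-- ===== SOURCE A (Python) =====
-- from typing import List, Tuple, Optional
--
-- def _build_page_offsets(
--     pages_text: List[str],
-- ) -> List[Tuple[int, int]]:
--     """Build list of (start_char, end_char) per page."""
--     offsets = []
--     pos = 0
--     for page_text in pages_text:
--         start = pos
--         end = pos + len(page_text)
--         offsets.append((start, end))
--         pos = end + 1  # +1 for the \n join separator
--     return offsets
-- ===== SOURCE B (Python) =====
-- from typing import List, Tuple
--
--
-- def _build_page_offsets(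
--     pages_text: List[str],
-- ) -> List[Tuple[int, int]]:
--     """Build list of (start_char, end_char) per page via a prefix table."""
--     lengths = [len(p) for p in pages_text]
--     prefix = [0]
--     for L in lengths:
--         prefix.append(prefix[-1] + L + 1)
--     # zip truncates prefix's trailing sentinel entry
--     return [(s, s + L) for s, L in zip(prefix, lengths)]
-- ===== Notes on version B (the rewrite author's own statement) =====
-- stated objective: alternative
-- what changed: B precomputes the page lengths and a cumulative prefix table of start offsets, then pairs starts with lengths in a separate zip pass, instead of A's single loop carrying a running position while appending pairs.
import Mathlib
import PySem

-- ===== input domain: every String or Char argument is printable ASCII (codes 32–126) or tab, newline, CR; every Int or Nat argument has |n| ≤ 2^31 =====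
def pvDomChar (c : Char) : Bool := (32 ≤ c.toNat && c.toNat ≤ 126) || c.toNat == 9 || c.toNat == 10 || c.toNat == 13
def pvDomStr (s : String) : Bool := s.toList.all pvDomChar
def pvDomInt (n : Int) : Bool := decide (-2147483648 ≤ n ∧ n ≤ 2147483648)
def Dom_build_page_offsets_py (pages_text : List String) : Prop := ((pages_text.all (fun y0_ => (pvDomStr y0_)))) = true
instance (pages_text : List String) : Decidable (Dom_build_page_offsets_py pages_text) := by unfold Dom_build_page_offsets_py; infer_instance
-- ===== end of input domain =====

-- B replaces A's single running-position loop by a precomputed lengths list, a cumulative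
-- prefix table of start offsets and a separate zip pass (alternative decomposition, same cost).

-- ===== PORT A =====
-- literal port of A: one loop carrying (offsets, pos), appending (start, end) each step
def build_page_offsets_py (pages_text : List String) : List (Int × Int) :=
  (pages_text.foldl
    (fun (st : List (Int × Int) × Int) page_text =>
      let start := st.2
      let «end» := st.2 + PySem.Str.len page_text
      (st.1 ++ [(start, «end»)], «end» + 1))
    ([], 0)).1

-- ===== PORT B =====
-- literal port of B: lengths, then prefix table (prefix[-1] + L + 1), then zip pairing pass
def build_page_offsets_py_alt (pages_text : List String) : List (Int × Int) :=
  let lengths := pages_text.map (fun p => PySem.Str.len p)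
  let prefix_ := lengths.foldl (fun acc L => acc ++ [acc.getLast! + L + 1]) [(0 : Int)]
  (prefix_.zip lengths).map (fun sL => (sL.1, sL.1 + sL.2))

-- ===== PRECONDITION & SPEC =====
def Spec_build_page_offsets_py (pages_text : List String) (out : List (Int × Int)) : Prop := out = build_page_offsets_py_alt pages_text
instance (pages_text : List String) (out : List (Int × Int)) : Decidable (Spec_build_page_offsets_py pages_text out) := by unfold Spec_build_page_offsets_py; infer_instance

-- ===== CLAIM (what is proved, stated in full; the proofs are below) =====
def Claim_equal_build_page_offsets_py : Prop := ∀ (pages_text : List String), Dom_build_page_offsets_py pages_text → Spec_build_page_offsets_py pages_text (build_page_offsets_py pages_text)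

-- ===== LEMMAS AND PROOFS =====

-- the intended result, as a structural recursion on the pages with a running start p
def pvF (p : Int) : List String → List (Int × Int)
  | [] => []
  | s :: ps => (p, p + PySem.Str.len s) :: pvF (p + PySem.Str.len s + 1) ps

-- the prefix table B builds, including its trailing sentinel entry
def pvS (p : Int) : List Int → List Int
  | [] => [p]
  | L :: ls => p :: pvS (p + L + 1) ls

theorem pvA_fold (ps : List String) : ∀ (acc : List (Int × Int)) (p : Int),
    (ps.foldl
      (fun (st : List (Int × Int) × Int) page_text =>
        let start := st.2
        let «end» := st.2 + PySem.Str.len page_text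
        (st.1 ++ [(start, «end»)], «end» + 1))
      (acc, p)).1 = acc ++ pvF p ps := by
  induction ps with
  | nil => intro acc p; simp [pvF]
  | cons s ps ih =>
      intro acc p
      simp only [List.foldl_cons]
      rw [ih]
      simp [pvF]

theorem pvB_prefix (ls : List Int) : ∀ (acc : List Int) (p : Int),
    (ls.foldl (fun acc L => acc ++ [acc.getLast! + L + 1]) (acc ++ [p])) = acc ++ pvS p ls := by
  induction ls with
  | nil => intro acc p; simp [pvS]
  | cons L ls ih =>
      intro acc p
      simp only [List.foldl_cons]
      have h : (acc ++ [p]).getLast! = p := by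
        simp [List.getLast!_eq_getLast?_getD]
      rw [h]
      rw [ih (acc ++ [p]) (p + L + 1)]
      simp [pvS]

theorem pvB_zip (ps : List String) : ∀ (p : Int),
    ((pvS p (ps.map (fun s => PySem.Str.len s))).zip
      (ps.map (fun s => PySem.Str.len s))).map (fun sL => (sL.1, sL.1 + sL.2))
      = pvF p ps := by
  induction ps with
  | nil => intro p; simp [pvS, pvF]
  | cons s ps ih =>
      intro p
      simp only [List.map_cons, pvS, pvF, List.zip_cons_cons, List.map]
      rw [ih]

-- ===== VERDICT (by name: the statement is the Claim_ definition above) =====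
theorem build_page_offsets_py_spec : Claim_equal_build_page_offsets_py := by
  intro pages_text _
  unfold Spec_build_page_offsets_py build_page_offsets_py build_page_offsets_py_alt
  have hA := pvA_fold pages_text [] 0
  simp only [List.nil_append] at hA
  rw [hA]
  have hP := pvB_prefix (pages_text.map (fun s => PySem.Str.len s)) [] 0
  simp only [List.nil_append] at hP
  simp only [hP]
  exact (pvB_zip pages_text 0).symm
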